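-- pv_equiv track=rewrite | github.com/Judongsung/algorithm | 백준/Gold/20055. 컨베이어 벨트 위의 로봇/컨베이어 벨트 위의 로봇.py | solution
-- ===== SOURCE A (Python) =====
-- def down_robot(robot_locations, down_idx):
--     result = False
--
--     if robot_locations and robot_locations[0] == down_idx:
--         robot_locations.pop(0)
--         result = True
--
--     return result
--
-- def get_idx(num, belt_len):
--     return (num+belt_len) % belt_len
--
-- def solution(n, k, alist):
--     step = 0
--     belt_len = n*2
--     up_idx = 0
--     down_idx = n-1
--     zero_count = alist.count(0)
--     robot_locations = []
--
--     while True: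
--         step += 1
--         up_idx = get_idx(up_idx-1, belt_len)
--         down_idx = get_idx(down_idx-1, belt_len)
--         down_robot(robot_locations, down_idx)
--
--         cur = 0
--         while cur < len(robot_locations):
--             cur_robot_loc = robot_locations[cur]
--             front_loc = get_idx(cur_robot_loc+1, belt_len)
--             if alist[front_loc] > 0 and not (cur > 0 and robot_locations[cur-1] == front_loc):
--                 robot_locations[cur] = front_loc
--                 alist[front_loc] -= 1
--                 if alist[front_loc] == 0:
--                     zero_count += 1
--                 if down_robot(robot_locations, down_idx):
--                     continue
--             cur += 1
--
--         if alist[up_idx] > 0: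
--             robot_locations.append(up_idx)
--             alist[up_idx] -= 1
--             if alist[up_idx] == 0:
--                 zero_count += 1
--
--         if zero_count >= k:
--             break
--
--     return step
-- ===== SOURCE B (Python) =====
-- def solution(n, k, alist):
--     # No robot queue: keep a SET of occupied belt cells and, each step, scan the
--     # belt cells by distance behind the unload slot (robots closest to unloading
--     # first), moving the robot on a cell forward when the next cell is intact and
--     # free.  Mutates alist in place, like the original.
--     belt_len = 2 * n
--     occupied = set()            # belt cells currently carrying a robot
--     zero_count = alist.count(0)
--     up_idx, down_idx = 0, n - 1
--     step = 0
--     while True: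
--         step += 1
--         up_idx = (up_idx - 1) % belt_len
--         down_idx = (down_idx - 1) % belt_len
--         occupied.discard(down_idx)            # robot at the unload cell leaves
--         for d in range(1, belt_len):          # cells by distance behind the unload cell
--             cell = (down_idx - d) % belt_len
--             if cell in occupied:
--                 front = (cell + 1) % belt_len
--                 if alist[front] > 0 and front not in occupied:
--                     occupied.discard(cell)
--                     alist[front] -= 1
--                     if alist[front] == 0:
--                         zero_count += 1
--                     if front != down_idx:     # moving onto the unload cell = leaving
--                         occupied.add(front)
--         if alist[up_idx] > 0:
--             occupied.add(up_idx)
--             alist[up_idx] -= 1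
--             if alist[up_idx] == 0:
--                 zero_count += 1
--         if zero_count >= k:
--             return step
-- ===== Notes on version B (the rewrite author's own statement) =====
-- stated objective: alternative
-- what changed: A maintains an ordered robot queue walked by index with in-place list surgery (set, pop(0), continue); B keeps no robot queue at all: a set of occupied belt cells, re-scanned each step by cell distance behind the unload slot, a robot moving when its front cell is intact and not in the set.
-- outside the precondition, e.g. on solution(-3, 3, [1, 0, 1]): A returns 2, B returns 3
import Mathlib
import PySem

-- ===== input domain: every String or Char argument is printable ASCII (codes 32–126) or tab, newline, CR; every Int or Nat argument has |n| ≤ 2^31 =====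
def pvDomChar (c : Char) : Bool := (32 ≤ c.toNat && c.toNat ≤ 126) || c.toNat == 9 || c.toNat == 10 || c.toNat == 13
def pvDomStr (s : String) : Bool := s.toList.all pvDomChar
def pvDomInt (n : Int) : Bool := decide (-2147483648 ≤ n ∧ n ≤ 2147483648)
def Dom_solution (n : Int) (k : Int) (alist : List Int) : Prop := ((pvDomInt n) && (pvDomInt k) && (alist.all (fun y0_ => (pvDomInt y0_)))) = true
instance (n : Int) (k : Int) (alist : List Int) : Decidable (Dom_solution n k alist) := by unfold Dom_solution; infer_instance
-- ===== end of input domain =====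

-- B keeps no robot queue at all: a SET of occupied belt cells, re-scanned each step by
-- cell distance behind the unload slot (objective: alternative data structure; equivalence
-- is about the RETURN value only — both programs mutate their `alist` argument identically).

-- Shared cell primitives: Python `alist[i]` / `alist[i] = v` (exact for 0 ≤ i < len,
-- which Pre_solution guarantees for every access both programs make).
def cellGet (cells : List Int) (i : Int) : Int := PySem.List.pyGetD cells i 0
def cellSet (cells : List Int) (i v : Int) : List Int := PySem.List.pySetD cells i v

-- ===== PORT A =====
-- def get_idx(num, belt_len): return (num+belt_len) % belt_len
def getIdxA (num belt : Int) : Int := PySem.Int.mod (num + belt) belt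

-- def down_robot(robot_locations, down_idx): pops the head if it sits at down_idx
def downRobot (rs : List Int) (down : Int) : List Int × Bool :=
  match rs with
  | [] => ([], false)
  | r :: rest => if r = down then (rest, true) else (r :: rest, false)

theorem downRobot_pop_len (rs : List Int) (d : Int) :
    (downRobot rs d).2 = true → (downRobot rs d).1.length + 1 = rs.length := by
  cases rs with
  | nil => simp [downRobot]
  | cons r rest => by_cases h : r = d <;> simp [downRobot, h]

-- A's inner `while cur < len(robot_locations)` loop (index walk, in-place set, pop+continue)
def innerA (rs : List Int) (cur : Nat) (cells : List Int) (zero : Int) (down belt : Int) :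
    List Int × List Int × Int :=
  if h : cur < rs.length then
    let r := rs[cur]
    let front := getIdxA (r + 1) belt
    if 0 < cellGet cells front ∧ ¬(0 < cur ∧ rs.getD (cur - 1) 0 = front) then
      let rs' := rs.set cur front
      let cells' := cellSet cells front (cellGet cells front - 1)
      let zero' := if cellGet cells' front = 0 then zero + 1 else zero
      let dr := downRobot rs' down
      if dr.2 then innerA dr.1 cur cells' zero' down belt
      else innerA rs' (cur + 1) cells' zero' down belt
    else innerA rs (cur + 1) cells zero down belt
  else (rs, cells, zero)
termination_by rs.length - cur
decreasing_by
  · have h2 := downRobot_pop_len (rs.set cur (getIdxA (rs[cur] + 1) belt)) down (by assumption)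
    simp only [List.length_set] at h2 ⊢
    omega
  · simp only [List.length_set]; omega
  · omega

-- A's `while True` loop (fuel is only an upper bound on the step count; see solution)
def loopA (fuel : Nat) (step up down zero : Int) (robots cells : List Int) (k belt : Int) : Int :=
  match fuel with
  | 0 => step
  | f + 1 =>
    let step := step + 1
    let up := getIdxA (up - 1) belt
    let down := getIdxA (down - 1) belt
    let robots := (downRobot robots down).1
    let t := innerA robots 0 cells zero down belt
    let t2 :=
      if 0 < cellGet t.2.1 up then
        let cells' := cellSet t.2.1 up (cellGet t.2.1 up - 1)
        (t.1 ++ [up], cells', if cellGet cells' up = 0 then t.2.2 + 1 else t.2.2)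
      else t
    if k ≤ t2.2.2 then step else loopA f step up down t2.2.2 t2.1 t2.2.1 k belt

def solution (n : Int) (k : Int) (alist : List Int) : Int :=
  let belt := n * 2
  let zero : Int := (PySem.List.count alist 0 : Nat)
  -- fuel: an upper bound on the number of iterations of A's `while True` loop on
  -- inputs satisfying Pre_solution (totality guard only; both ports use the same bound)
  let fuel := (belt * ((alist.take belt.toNat).foldl (fun s a => s + max a 0) 0 + 2)).natAbs + 2
  loopA fuel 0 0 (n - 1) zero [] alist k belt

-- ===== PORT B =====
-- B's `for d in range(1, belt_len)` scan over the cells behind the unload slot,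
-- with `occupied` a Python set of belt cells (PySem.Set Int)
def scanB (fuel : Nat) (d : Int) (occ : PySem.Set Int) (cells : List Int) (zero down belt : Int) :
    List Int × List Int × Int :=
  match fuel with
  | 0 => (occ, cells, zero)
  | f + 1 =>
    let cell := PySem.Int.mod (down - d) belt
    if cell ∈ occ then
      let front := PySem.Int.mod (cell + 1) belt
      if 0 < cellGet cells front ∧ front ∉ occ then
        let occ1 := PySem.Set.discard occ cell
        let cells' := cellSet cells front (cellGet cells front - 1)
        let zero' := if cellGet cells' front = 0 then zero + 1 else zero
        let occ2 := if front = down then occ1 else PySem.Set.add occ1 front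
        scanB f (d + 1) occ2 cells' zero' down belt
      else scanB f (d + 1) occ cells zero down belt
    else scanB f (d + 1) occ cells zero down belt

def loopB (fuel : Nat) (step up down zero : Int) (occ cells : List Int) (k belt : Int) : Int :=
  match fuel with
  | 0 => step
  | f + 1 =>
    let step := step + 1
    let up := PySem.Int.mod (up - 1) belt
    let down := PySem.Int.mod (down - 1) belt
    let occ0 := PySem.Set.discard occ down
    let t := scanB (belt - 1).toNat 1 occ0 cells zero down belt
    let t2 :=
      if 0 < cellGet t.2.1 up then
        let cells' := cellSet t.2.1 up (cellGet t.2.1 up - 1)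
        (PySem.Set.add t.1 up, cells', if cellGet cells' up = 0 then t.2.2 + 1 else t.2.2)
      else t
    if k ≤ t2.2.2 then step else loopB f step up down t2.2.2 t2.1 t2.2.1 k belt

def solution_alt (n : Int) (k : Int) (alist : List Int) : Int :=
  let belt := 2 * n
  let zero : Int := (PySem.List.count alist 0 : Nat)
  -- same step-count bound as the guard of A's port
  let fuel := (belt * ((alist.take belt.toNat).foldl (fun s a => s + max a 0) 0 + 2)).natAbs + 2
  loopB fuel 0 0 (n - 1) zero [] alist k belt

-- ===== PRECONDITION & SPEC =====
-- Pre_solution covers the inputs on which A returns normally: either a genuine belt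
-- (n ≥ 1, at least 2n cells, and k no larger than the attainable zero count — only the
-- initially-zero cells plus the positive cells among the first 2n can ever reach zero;
-- for larger k A's `while True` never terminates), or the degenerate n ≤ -1 inputs with
-- k at most the initial zero count, on which both programs return 1 after one step
-- (negative belt length, negative-index wraparound).  Excluded: n = 0
-- (ZeroDivisionError), lists shorter than the belt (IndexError at the first load),
-- k above the attainable zero count (divergence), and the remaining n ≤ -1 corner
-- (k above the initial zero count yet terminating), where A's multi-step value is an
-- artefact of negative-index wraparound and B's scan over the (empty) negative range
-- legitimately counts steps differently.
def Pre_solution (n : Int) (k : Int) (alist : List Int) : Prop :=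
  (1 ≤ n ∧ 2 * n ≤ (alist.length : Int) ∧
    k ≤ (alist.count 0 : Nat) + (((alist.take (2 * n).toNat).filter (fun a => 0 < a)).length : Nat)) ∨
  (n ≤ -1 ∧ alist ≠ [] ∧ k ≤ (alist.count 0 : Nat))
instance (n : Int) (k : Int) (alist : List Int) : Decidable (Pre_solution n k alist) := by
  unfold Pre_solution; infer_instance

def pvWitness_solution : Int × Int × List Int := (2, 3, [1, 2, 1, 0, 2, 1])

def Spec_solution (n : Int) (k : Int) (alist : List Int) (out : Int) : Prop := out = solution_alt n k alist
instance (n : Int) (k : Int) (alist : List Int) (out : Int) : Decidable (Spec_solution n k alist out) := by unfold Spec_solution; infer_instance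

-- ===== CLAIM (what is proved, stated in full; the proofs are below) =====
def Claim_equal_solution : Prop := ∀ (n : Int) (k : Int) (alist : List Int), Dom_solution n k alist → Pre_solution n k alist → Spec_solution n k alist (solution n k alist)

-- ===== LEMMAS AND PROOFS =====

def ddist (belt down r : Int) : Int := (down - r) % belt

theorem getIdx_eq (num belt : Int) (h : 0 < belt) : PySem.Int.mod (num + belt) belt = num % belt := by
  rw [PySem.Int.mod_eq_emod_of_pos h, Int.add_emod_right]

theorem modp (x belt : Int) (h : 0 < belt) : PySem.Int.mod x belt = x % belt :=
  PySem.Int.mod_eq_emod_of_pos h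

theorem emod_lb (a b : Int) (h : 0 < b) : 0 ≤ a % b := Int.emod_nonneg a (ne_of_gt h)
theorem emod_ub (a b : Int) (h : 0 < b) : a % b < b := Int.emod_lt_of_pos a h

theorem ddist_inj (belt down p q : Int) (h : 0 < belt) (hp1 : 0 ≤ p) (hp2 : p < belt)
    (hq1 : 0 ≤ q) (hq2 : q < belt) (he : ddist belt down p = ddist belt down q) : p = q := by
  unfold ddist at he
  have hd : belt ∣ (down - q) - (down - p) := Int.ModEq.dvd he
  have h3 : (down - q) - (down - p) = p - q := by ring
  rw [h3] at hd
  have habs : |p - q| < belt := abs_lt.mpr ⟨by omega, by omega⟩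
  have := Int.eq_zero_of_abs_lt_dvd hd habs
  omega

theorem ddist_zero_iff (belt down p : Int) (h : 0 < belt) (hp1 : 0 ≤ p) (hp2 : p < belt)
    (hd1 : 0 ≤ down) (hd2 : down < belt) : ddist belt down p = 0 ↔ p = down := by
  constructor
  · intro he
    have h0 : ddist belt down down = 0 := by unfold ddist; simp
    exact ddist_inj belt down p down h hp1 hp2 hd1 hd2 (by rw [he, h0])
  · intro he; subst he; unfold ddist; simp

theorem sub_one_emod (x belt : Int) (hb : 2 ≤ belt) : (x - 1) % belt = (x % belt - 1) % belt := by
  conv_lhs => rw [Int.sub_emod]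
  rw [Int.emod_eq_of_lt (a := (1:Int)) (by omega) (by omega)]

theorem front_ddist (belt down p : Int) (hb : 2 ≤ belt) (hd : 1 ≤ ddist belt down p) :
    ddist belt down ((p + 1) % belt) = ddist belt down p - 1 := by
  unfold ddist at *
  have hb0 : 0 < belt := by omega
  have h1 : (down - (p + 1) % belt) % belt = (down - (p + 1)) % belt := by
    rw [Int.sub_emod down ((p+1) % belt) belt, Int.emod_emod_of_dvd _ dvd_rfl, ← Int.sub_emod]
  rw [h1]
  have h2 : down - (p + 1) = (down - p) - 1 := by ring
  rw [h2, sub_one_emod (down - p) belt hb]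
  have hub := emod_ub (down - p) belt hb0
  rw [Int.emod_eq_of_lt (by omega) (by omega)]

theorem ddist_cell (belt down d : Int) (hb : 0 < belt) (h1 : 0 ≤ d) (h2 : d < belt) :
    ddist belt down (PySem.Int.mod (down - d) belt) = d := by
  rw [modp _ _ hb]
  unfold ddist
  have h3 : (down - (down - d) % belt) % belt = (down - (down - d)) % belt := by
    rw [Int.sub_emod down ((down - d) % belt) belt, Int.emod_emod_of_dvd _ dvd_rfl, ← Int.sub_emod]
  rw [h3]
  have h4 : down - (down - d) = d := by ring
  rw [h4]
  exact Int.emod_eq_of_lt h1 h2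

theorem rot_ddist (belt down r : Int) (hb : 2 ≤ belt) :
    ddist belt ((down - 1) % belt) r = (ddist belt down r - 1) % belt := by
  unfold ddist
  have h1 : ((down - 1) % belt - r) % belt = ((down - 1) - r) % belt := by
    rw [Int.sub_emod ((down-1) % belt) r belt, Int.emod_emod_of_dvd _ dvd_rfl, ← Int.sub_emod]
  rw [h1]
  have h2 : (down - 1) - r = (down - r) - 1 := by ring
  rw [h2, sub_one_emod (down - r) belt hb]

theorem rot_sub (belt down up : Int) (hb : 0 < belt) :
    ((down - 1) % belt - (up - 1) % belt) % belt = (down - up) % belt := by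
  rw [Int.sub_emod ((down-1) % belt) ((up-1) % belt) belt, Int.emod_emod_of_dvd _ dvd_rfl,
      Int.emod_emod_of_dvd _ dvd_rfl, ← Int.sub_emod]
  congr 1; ring

-- ===== step lemmas for the ports =====
theorem innerA_stop (rs : List Int) (cur : Nat) (cells : List Int) (zero down belt : Int)
    (h : ¬ cur < rs.length) : innerA rs cur cells zero down belt = (rs, cells, zero) := by
  rw [innerA]; simp [h]

theorem innerA_blocked (rs : List Int) (cur : Nat) (cells : List Int) (zero down belt front : Int)
    (h : cur < rs.length) (hfr : front = getIdxA (rs[cur] + 1) belt)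
    (hc : ¬(0 < cellGet cells front ∧ ¬(0 < cur ∧ rs.getD (cur - 1) 0 = front))) :
    innerA rs cur cells zero down belt = innerA rs (cur + 1) cells zero down belt := by
  subst hfr; rw [innerA]; simp only [dif_pos h, if_neg hc]

theorem innerA_move (rs : List Int) (cur : Nat) (cells : List Int) (zero down belt front : Int)
    (h : cur < rs.length) (hfr : front = getIdxA (rs[cur] + 1) belt)
    (hc : 0 < cellGet cells front ∧ ¬(0 < cur ∧ rs.getD (cur - 1) 0 = front)) :
    innerA rs cur cells zero down belt =
      (if (downRobot (rs.set cur front) down).2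
       then innerA (downRobot (rs.set cur front) down).1 cur
            (cellSet cells front (cellGet cells front - 1))
            (if cellGet (cellSet cells front (cellGet cells front - 1)) front = 0 then zero + 1 else zero)
            down belt
       else innerA (rs.set cur front) (cur + 1)
            (cellSet cells front (cellGet cells front - 1))
            (if cellGet (cellSet cells front (cellGet cells front - 1)) front = 0 then zero + 1 else zero)
            down belt) := by
  subst hfr
  rw [innerA]
  simp only [dif_pos h, if_pos hc]

theorem scanB_notmem (f : Nat) (d cell : Int) (occ cells : List Int) (zero down belt : Int)
    (hcell : cell = PySem.Int.mod (down - d) belt) (h : cell ∉ occ) :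
    scanB (f + 1) d occ cells zero down belt = scanB f (d + 1) occ cells zero down belt := by
  subst hcell; rw [scanB]; simp only [if_neg h]

theorem scanB_blocked (f : Nat) (d cell front : Int) (occ cells : List Int) (zero down belt : Int)
    (hcell : cell = PySem.Int.mod (down - d) belt)
    (hfront : front = PySem.Int.mod (cell + 1) belt)
    (hm : cell ∈ occ)
    (hc : ¬(0 < cellGet cells front ∧ front ∉ occ)) :
    scanB (f + 1) d occ cells zero down belt = scanB f (d + 1) occ cells zero down belt := by
  subst hfront; subst hcell; rw [scanB]; simp only [if_pos hm, if_neg hc]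

theorem scanB_move (f : Nat) (d cell front : Int) (occ cells : List Int) (zero down belt : Int)
    (hcell : cell = PySem.Int.mod (down - d) belt)
    (hfront : front = PySem.Int.mod (cell + 1) belt)
    (hm : cell ∈ occ)
    (hc : 0 < cellGet cells front ∧ front ∉ occ) :
    scanB (f + 1) d occ cells zero down belt =
      scanB f (d + 1)
        (if front = down then PySem.Set.discard occ cell
         else PySem.Set.add (PySem.Set.discard occ cell) front)
        (cellSet cells front (cellGet cells front - 1))
        (if cellGet (cellSet cells front (cellGet cells front - 1)) front = 0 then zero + 1 else zero)
        down belt := by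
  subst hfront; subst hcell; rw [scanB]; simp only [if_pos hm, if_pos hc]

theorem scanB_empty (f : Nat) : ∀ (d : Int) (cells : List Int) (zero down belt : Int),
    scanB f d [] cells zero down belt = ([], cells, zero) := by
  induction f with
  | zero => intros; rfl
  | succ g ih =>
    intro d cells zero down belt
    rw [scanB_notmem g d _ [] cells zero down belt rfl (by simp)]
    exact ih _ _ _ _ _

theorem set_append_len (done rest : List Int) (p front : Int) :
    (done ++ p :: rest).set done.length front = done ++ front :: rest := by
  induction done with
  | nil => simp
  | cons d ds ih => simp [List.set_cons_succ, ih]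

theorem getD_last (done rest : List Int) (p : Int) (h : done ≠ []) :
    (done ++ p :: rest).getD (done.length - 1) 0 = done.getLast h := by
  have h1 : done.length - 1 < done.length := by
    have := List.length_pos_iff.mpr h; omega
  rw [List.getD_append _ _ _ _ h1, List.getLast_eq_getElem]
  exact List.getD_eq_getElem done 0 h1

theorem getLast_max (f : Int → Int) :
    ∀ (l : List Int) (h : l ≠ []) (x : Int),
    List.Pairwise (fun a b => f a < f b) l → x ∈ l →
    x = l.getLast h ∨ f x < f (l.getLast h) := by
  intro l
  induction l with
  | nil => intro h; exact absurd rfl h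
  | cons a t ih =>
    intro h x hp hx
    cases t with
    | nil => simp at hx; subst hx; left; rfl
    | cons b t2 =>
      rw [List.getLast_cons (by simp : (b :: t2) ≠ [])]
      rcases List.mem_cons.mp hx with hxa | hxt
      · subst hxa
        right
        have hlast : (b :: t2).getLast (by simp) ∈ b :: t2 := List.getLast_mem _
        exact (List.pairwise_cons.mp hp).1 _ hlast
      · exact ih (by simp) x (List.pairwise_cons.mp hp).2 hxt

-- ===== the inner-phase simulation: A's queue walk vs B's cell scan =====
theorem scan_eq (belt down M : Int) (hb : 2 ≤ belt) (hd1b : 0 ≤ down) (hd2b : down < belt)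
    (hM : M ≤ belt - 1) :
    ∀ (fuel : Nat) (d : Int) (todo done occ cells : List Int) (zero : Int),
    d + (fuel : Int) = belt →
    1 ≤ d →
    (∀ r ∈ done ++ todo, 0 ≤ r ∧ r < belt) →
    (∀ r ∈ done, 1 ≤ ddist belt down r ∧ ddist belt down r < d ∧ ddist belt down r ≤ M) →
    (∀ r ∈ todo, d ≤ ddist belt down r ∧ ddist belt down r ≤ M) →
    List.Pairwise (fun a b => ddist belt down a < ddist belt down b) done →
    List.Pairwise (fun a b => ddist belt down a < ddist belt down b) todo →
    occ.Nodup →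
    (∀ p, p ∈ occ ↔ p ∈ done ++ todo) →
    (scanB fuel d occ cells zero down belt).2 =
      (innerA (done ++ todo) done.length cells zero down belt).2 ∧
    (scanB fuel d occ cells zero down belt).1.Nodup ∧
    (∀ p, p ∈ (scanB fuel d occ cells zero down belt).1 ↔
        p ∈ (innerA (done ++ todo) done.length cells zero down belt).1) ∧
    (∀ r ∈ (innerA (done ++ todo) done.length cells zero down belt).1,
        (0 ≤ r ∧ r < belt) ∧ 1 ≤ ddist belt down r ∧ ddist belt down r ≤ M) ∧
    List.Pairwise (fun a b => ddist belt down a < ddist belt down b)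
        (innerA (done ++ todo) done.length cells zero down belt).1 := by
  intro fuel
  induction fuel with
  | zero =>
    intro d todo done occ cells zero hdf hd1 hbnd hdone htodo hpd hpt hnd hocc
    have htnil : todo = [] := by
      cases todo with
      | nil => rfl
      | cons p rest =>
        have h1 := htodo p (by simp)
        simp at hdf
        omega
    subst htnil
    rw [innerA_stop _ _ _ _ _ _ (by simp)]
    refine ⟨rfl, hnd, hocc, ?_, by simpa using hpd⟩
    intro r hr
    simp at hr
    have h1 := hbnd r (by simp [hr])
    have h2 := hdone r hr
    exact ⟨h1, h2.1, h2.2.2⟩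
  | succ f ih =>
    intro d todo done occ cells zero hdf hd1 hbnd hdone htodo hpd hpt hnd hocc
    have hb0 : (0:Int) < belt := by omega
    have hdub : d < belt := by push_cast at hdf; omega
    have hdfr : d + 1 + (f : Int) = belt := by push_cast at hdf ⊢; omega
    set cell := PySem.Int.mod (down - d) belt with hcelldef
    have hdc : ddist belt down cell = d := ddist_cell belt down d hb0 (by omega) hdub
    have hcb1 : 0 ≤ cell := by rw [hcelldef, modp _ _ hb0]; exact emod_lb _ _ hb0
    have hcb2 : cell < belt := by rw [hcelldef, modp _ _ hb0]; exact emod_ub _ _ hb0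
    by_cases hm : cell ∈ occ
    · -- a robot sits at distance d: it is the head of todo
      have hmem : cell ∈ done ++ todo := (hocc cell).mp hm
      have hnotdone : cell ∉ done := by
        intro hcd
        have := (hdone cell hcd).2.1
        omega
      have hmt : cell ∈ todo := by
        rcases List.mem_append.mp hmem with h | h
        · exact absurd h hnotdone
        · exact h
      obtain ⟨p, rest, htodoeq⟩ : ∃ p rest, todo = p :: rest := by
        cases todo with
        | nil => simp at hmt
        | cons p rest => exact ⟨p, rest, rfl⟩
      subst htodoeq
      have hpeq : p = cell := by
        rcases List.mem_cons.mp hmt with h | h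
        · exact h.symm
        · exfalso
          have h1 := (List.pairwise_cons.mp hpt).1 cell h
          have h2 := htodo p (by simp)
          omega
      subst hpeq
      -- the front cell
      set front := PySem.Int.mod (cell + 1) belt with hfrontdef
      have hfront_eq : front = (cell + 1) % belt := by rw [hfrontdef, modp _ _ hb0]
      have hfb1 : 0 ≤ front := by rw [hfront_eq]; exact emod_lb _ _ hb0
      have hfb2 : front < belt := by rw [hfront_eq]; exact emod_ub _ _ hb0
      have hdfront : ddist belt down front = d - 1 := by
        rw [hfront_eq, front_ddist belt down cell hb (by omega), hdc]
      -- A's front is the same integer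
      have hfrA : front = getIdxA (cell + 1) belt := by
        rw [getIdxA, getIdx_eq _ _ hb0, hfront_eq]
      -- front ∈ occ ↔ front ∈ done (cell and rest all have distance ≥ d > d-1)
      have hfocc : front ∈ occ ↔ front ∈ done := by
        rw [hocc front]
        constructor
        · intro h
          rcases List.mem_append.mp h with h | h
          · exact h
          · exfalso
            rcases List.mem_cons.mp h with h2 | h2
            · rw [h2] at hdfront; omega
            · have h3 := (List.pairwise_cons.mp hpt).1 front h2
              omega
        · intro h; exact List.mem_append.mpr (Or.inl h)
      -- front ∈ done ↔ done's last element is front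
      have hfl : front ∈ done ↔ done.getLast? = some front := by
        constructor
        · intro hmemd
          have hne : done ≠ [] := List.ne_nil_of_mem hmemd
          rcases getLast_max (ddist belt down) done hne front hpd hmemd with h | h
          · rw [List.getLast?_eq_some_getLast (h := hne), h]
          · exfalso
            have hlm : done.getLast hne ∈ done := List.getLast_mem hne
            have := (hdone _ hlm).2.1
            omega
        · intro h; exact List.mem_of_getLast? h
      -- A's collision guard equals front ∈ occ
      have hguard : (0 < done.length ∧ (done ++ cell :: rest).getD (done.length - 1) 0 = front)
          ↔ front ∈ occ := by
        rw [hfocc, hfl]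
        cases hdoneeq : done with
        | nil => simp
        | cons d0 ds =>
          have hne : done ≠ [] := by rw [hdoneeq]; simp
          rw [← hdoneeq]
          rw [getD_last done rest cell hne]
          rw [List.getLast?_eq_some_getLast (h := hne)]
          constructor
          · rintro ⟨-, h2⟩; simp [h2]
          · intro h
            simp at h
            exact ⟨by rw [hdoneeq]; simp, h⟩
      have hlen : done.length < (done ++ cell :: rest).length := by simp
      have hget : (done ++ cell :: rest)[done.length]'hlen = cell := by simp
      have hfrA' : front = getIdxA ((done ++ cell :: rest)[done.length]'hlen + 1) belt := by
        rw [hget]; exact hfrA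
      -- done's head (if any) is not at the unload cell
      have hheadne : ∀ d0 ds, done = d0 :: ds → d0 ≠ down := by
        intro d0 ds hdq hcon
        have h1 := (hdone d0 (by rw [hdq]; simp)).1
        have h2 := hbnd d0 (by rw [hdq]; simp)
        have := (ddist_zero_iff belt down d0 hb0 h2.1 h2.2 hd1b hd2b).mpr hcon
        omega
      have hcellnotrest : cell ∉ rest := by
        intro h
        have := (List.pairwise_cons.mp hpt).1 cell h
        omega
      have hoccd : ∀ q, q ∈ PySem.Set.discard occ cell ↔ q ∈ done ++ rest := by
        intro q
        rw [PySem.Set.mem_discard, hocc]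
        constructor
        · rintro ⟨h1, h2⟩
          rcases List.mem_append.mp h1 with h | h
          · exact List.mem_append.mpr (Or.inl h)
          · rcases List.mem_cons.mp h with h3 | h3
            · exact absurd h3 h2
            · exact List.mem_append.mpr (Or.inr h3)
        · intro h1
          rcases List.mem_append.mp h1 with h | h
          · exact ⟨List.mem_append.mpr (Or.inl h), fun hc => hnotdone (hc ▸ h)⟩
          · exact ⟨List.mem_append.mpr (Or.inr (List.mem_cons.mpr (Or.inr h))),
              fun hc => hcellnotrest (hc ▸ h)⟩
      have hnd1 : (PySem.Set.discard occ cell).Nodup := PySem.Set.nodup_discard _ _ hnd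
      by_cases hmv : 0 < cellGet cells front ∧ front ∉ occ
      · -- MOVE: both sides decrement the front cell
        rw [scanB_move f d cell front occ cells zero down belt hcelldef hfrontdef hm hmv]
        rw [innerA_move _ _ _ _ _ _ front hlen hfrA'
            ⟨hmv.1, by rw [hguard]; exact fun h => hmv.2 h⟩]
        rw [set_append_len]
        have hfnotdone : front ∉ done := fun h => hmv.2 (hfocc.mpr h)
        by_cases hfd : front = down
        · -- the moved robot lands on the unload cell and leaves at once
          have hdone_nil : done = [] := by
            cases hdq : done with
            | nil => rfl
            | cons d0 ds =>
              exfalso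
              have h2 := (hdone d0 (by rw [hdq]; simp)).2.1
              have h1 := (hdone d0 (by rw [hdq]; simp)).1
              have hdz : ddist belt down front = 0 := by
                rw [hfd]
                exact (ddist_zero_iff belt down down hb0 hd1b hd2b hd1b hd2b).mpr rfl
              omega
          subst hdone_nil
          simp only [List.nil_append]
          have hdr : downRobot (front :: rest) down = (rest, true) := by
            simp [downRobot, hfd]
          rw [hdr]
          simp only [if_pos hfd]
          have hih := ih (d + 1) rest [] (PySem.Set.discard occ cell)
            (cellSet cells front (cellGet cells front - 1))
            (if cellGet (cellSet cells front (cellGet cells front - 1)) front = 0 then zero + 1 else zero)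
            hdfr (by omega)
            (by intro r hr; simp at hr; exact hbnd r (by simp [hr]))
            (by simp)
            (by intro r hr
                have h1 := htodo r (by simp [hr])
                have h2 := (List.pairwise_cons.mp hpt).1 r hr
                omega)
            (by simp) (List.pairwise_cons.mp hpt).2 hnd1
            (by intro q; rw [hoccd q])
          simpa using hih
        · -- the moved robot stays: done grows by front
          have hdr : downRobot (done ++ front :: rest) down = (done ++ front :: rest, false) := by
            cases hdq : done with
            | nil => simp [downRobot, hfd]
            | cons d0 ds =>
              have := hheadne d0 ds hdq
              simp [downRobot, this]
          rw [hdr]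
          simp only [if_neg (show ¬((done ++ front :: rest, false).2 = true) by simp), if_neg hfd]
          have hfront1 : 1 ≤ ddist belt down front := by
            have hnz : ddist belt down front ≠ 0 := fun h =>
              hfd ((ddist_zero_iff belt down front hb0 hfb1 hfb2 hd1b hd2b).mp h)
            have h0' : 0 ≤ ddist belt down front := emod_lb _ _ hb0
            omega
          have hdstrict : ∀ r ∈ done, ddist belt down r < d - 1 := by
            intro r hr
            have h1 := (hdone r hr).2.1
            have hne : r ≠ front := fun h => hfnotdone (h ▸ hr)
            have h2 := hbnd r (by simp [hr])
            have h3 : ddist belt down r ≠ d - 1 := by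
              intro h
              exact hne (ddist_inj belt down r front hb0 h2.1 h2.2 hfb1 hfb2 (by omega))
            omega
          have hih := ih (d + 1) rest (done ++ [front])
            (PySem.Set.add (PySem.Set.discard occ cell) front)
            (cellSet cells front (cellGet cells front - 1))
            (if cellGet (cellSet cells front (cellGet cells front - 1)) front = 0 then zero + 1 else zero)
            hdfr (by omega)
            (by intro r hr
                simp only [List.append_assoc, List.singleton_append] at hr
                rcases List.mem_append.mp hr with h | h
                · exact hbnd r (by simp [h])
                · rcases List.mem_cons.mp h with h2 | h2
                  · exact h2 ▸ ⟨hfb1, hfb2⟩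
                  · exact hbnd r (by simp [h2]))
            (by intro r hr
                rcases List.mem_append.mp hr with h | h
                · have := hdone r h; exact ⟨this.1, by omega, this.2.2⟩
                · simp at h; subst h
                  refine ⟨by omega, by omega, ?_⟩
                  have := htodo cell (by simp)
                  omega)
            (by intro r hr
                have h1 := htodo r (by simp [hr])
                have h2 := (List.pairwise_cons.mp hpt).1 r hr
                omega)
            (by rw [List.pairwise_append]
                refine ⟨hpd, List.pairwise_singleton _ _, ?_⟩
                intro x hx y hy
                simp at hy; subst hy
                have := hdstrict x hx
                omega)
            (List.pairwise_cons.mp hpt).2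
            (PySem.Set.nodup_add _ _ hnd1)
            (by intro q
                rw [PySem.Set.mem_add, hoccd q]
                simp only [List.append_assoc, List.singleton_append, List.mem_append, List.mem_cons]
                tauto)
          simp only [List.append_assoc, List.singleton_append, List.length_append,
            List.length_cons, List.length_nil] at hih
          exact hih
      · -- BLOCKED: both sides keep the robot where it is
        rw [scanB_blocked f d cell front occ cells zero down belt hcelldef hfrontdef hm hmv]
        rw [innerA_blocked _ _ _ _ _ _ front hlen hfrA'
            (by intro hcon
                exact hmv ⟨hcon.1, fun h => hcon.2 (hguard.mpr h)⟩)]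
        have hih := ih (d + 1) rest (done ++ [cell]) occ cells zero
          hdfr (by omega)
          (by intro r hr
              simp only [List.append_assoc, List.singleton_append] at hr
              exact hbnd r (by simpa using hr))
          (by intro r hr
              rcases List.mem_append.mp hr with h | h
              · have := hdone r h; exact ⟨this.1, by omega, this.2.2⟩
              · simp at h; subst h
                have := htodo cell (by simp)
                exact ⟨by omega, by omega, this.2⟩)
          (by intro r hr
              have h1 := htodo r (by simp [hr])
              have h2 := (List.pairwise_cons.mp hpt).1 r hr
              omega)
          (by rw [List.pairwise_append]
              refine ⟨hpd, List.pairwise_singleton _ _, ?_⟩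
              intro x hx y hy
              simp at hy; subst hy
              have := (hdone x hx).2.1
              omega)
          (List.pairwise_cons.mp hpt).2 hnd
          (by intro q
              rw [hocc q]
              simp only [List.append_assoc, List.singleton_append])
        simp only [List.append_assoc, List.singleton_append, List.length_append,
          List.length_cons, List.length_nil] at hih
        exact hih
    · -- no robot at distance d: B skips the cell, A's queue is untouched
      rw [scanB_notmem f d cell occ cells zero down belt hcelldef hm]
      have htodo' : ∀ r ∈ todo, d + 1 ≤ ddist belt down r ∧ ddist belt down r ≤ M := by
        intro r hr
        have h1 := htodo r hr
        refine ⟨?_, h1.2⟩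
        by_contra hcon
        have hdr : ddist belt down r = d := by omega
        have h2 := hbnd r (by simp [hr])
        have hreq : r = cell := ddist_inj belt down r cell hb0 h2.1 h2.2 hcb1 hcb2 (by omega)
        exact hm ((hocc cell).mpr (by rw [← hreq]; simp [hr]))
      exact ih (d + 1) todo done occ cells zero hdfr (by omega) hbnd
        (by intro r hr; have := hdone r hr; exact ⟨this.1, by omega, this.2.2⟩)
        htodo' hpd hpt hnd hocc

theorem loopA_succ (f : Nat) (step up down zero : Int) (robots cells : List Int) (k belt : Int) :
    loopA (f + 1) step up down zero robots cells k belt =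
      (let up' := getIdxA (up - 1) belt
       let down' := getIdxA (down - 1) belt
       let robots1 := (downRobot robots down').1
       let t := innerA robots1 0 cells zero down' belt
       let t2 := if 0 < cellGet t.2.1 up' then
           (t.1 ++ [up'], cellSet t.2.1 up' (cellGet t.2.1 up' - 1),
            if cellGet (cellSet t.2.1 up' (cellGet t.2.1 up' - 1)) up' = 0 then t.2.2 + 1 else t.2.2)
         else t
       if k ≤ t2.2.2 then step + 1 else loopA f (step + 1) up' down' t2.2.2 t2.1 t2.2.1 k belt) := rfl

theorem loopB_succ (f : Nat) (step up down zero : Int) (occ cells : List Int) (k belt : Int) :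
    loopB (f + 1) step up down zero occ cells k belt =
      (let up' := PySem.Int.mod (up - 1) belt
       let down' := PySem.Int.mod (down - 1) belt
       let occ0 := PySem.Set.discard occ down'
       let t := scanB (belt - 1).toNat 1 occ0 cells zero down' belt
       let t2 := if 0 < cellGet t.2.1 up' then
           (PySem.Set.add t.1 up', cellSet t.2.1 up' (cellGet t.2.1 up' - 1),
            if cellGet (cellSet t.2.1 up' (cellGet t.2.1 up' - 1)) up' = 0 then t.2.2 + 1 else t.2.2)
         else t
       if k ≤ t2.2.2 then step + 1 else loopB f (step + 1) up' down' t2.2.2 t2.1 t2.2.1 k belt) := rfl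

theorem loop_eq (n k belt : Int) (hn : 1 ≤ n) (hbelt : belt = 2 * n) :
    ∀ (fuel : Nat) (step up down zero : Int) (rs occ cells : List Int),
    0 ≤ up → up < belt → 0 ≤ down → down < belt →
    (down - up) % belt = (n - 1) % belt →
    (∀ r ∈ rs, 0 ≤ r ∧ r < belt) →
    (2 ≤ n → (∀ r ∈ rs, 1 ≤ ddist belt down r ∧ ddist belt down r ≤ n - 1) ∧
        List.Pairwise (fun a b => ddist belt down a < ddist belt down b) rs) →
    (n = 1 → rs.length ≤ 1) →
    occ.Nodup →
    (∀ p, p ∈ occ ↔ p ∈ rs) →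
    loopA fuel step up down zero rs cells k belt = loopB fuel step up down zero occ cells k belt := by
  intro fuel
  induction fuel with
  | zero => intros; rfl
  | succ f ih =>
    intro step up down zero rs occ cells hu1 hu2 hd1 hd2 hud hrb hrd hr1 hnd hocc
    have hb : (2:Int) ≤ belt := by omega
    have hb0 : (0:Int) < belt := by omega
    rw [loopA_succ, loopB_succ]
    simp only [getIdxA]
    rw [getIdx_eq (up - 1) belt hb0, getIdx_eq (down - 1) belt hb0,
        modp (up - 1) belt hb0, modp (down - 1) belt hb0]
    set u' := (up - 1) % belt with hu'def
    set d' := (down - 1) % belt with hd'def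
    have hu'1 : 0 ≤ u' := emod_lb _ _ hb0
    have hu'2 : u' < belt := emod_ub _ _ hb0
    have hd'1 : 0 ≤ d' := emod_lb _ _ hb0
    have hd'2 : d' < belt := emod_ub _ _ hb0
    have hud' : (d' - u') % belt = (n - 1) % belt := by
      rw [hu'def, hd'def, rot_sub _ _ _ hb0]; exact hud
    have huddist : ddist belt d' u' = n - 1 := by
      show (d' - u') % belt = n - 1
      rw [hud', Int.emod_eq_of_lt (by omega) (by omega)]
    have hsub : ∀ r ∈ (downRobot rs d').1, r ∈ rs := by
      intro r hr
      cases rs with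
      | nil => simpa [downRobot] using hr
      | cons r0 rest =>
        by_cases h : r0 = d' <;> simp [downRobot, h] at hr <;> simp [List.mem_cons] <;> tauto
    rcases (by omega : 2 ≤ n ∨ n = 1) with hn2 | hn1
    · -- the general case n ≥ 2
      obtain ⟨hfacts, hpair⟩ := hrd hn2
      have hrot : ∀ r ∈ rs, ddist belt d' r = ddist belt down r - 1 := by
        intro r hr
        have h := rot_ddist belt down r hb
        have hf := hfacts r hr
        rw [hd'def, h, Int.emod_eq_of_lt (by omega) (by omega)]
      -- membership in the surviving robot list
      have hdmem : ∀ p, p ∈ (downRobot rs d').1 ↔ (p ∈ rs ∧ p ≠ d') := by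
        intro p
        cases hrob : rs with
        | nil => simp [downRobot]
        | cons r0 rest =>
          by_cases h0 : r0 = d'
          · simp only [downRobot, if_pos h0]
            constructor
            · intro hp
              refine ⟨by simp [hp], ?_⟩
              intro hc
              rw [← h0] at hc
              subst hc
              have := (List.pairwise_cons.mp (hrob ▸ hpair)).1 p hp
              omega
            · rintro ⟨hp, hne⟩
              rcases List.mem_cons.mp hp with h | h
              · exact absurd (h.trans h0) hne
              · exact h
          · simp only [downRobot, if_neg h0]
            constructor
            · intro hp
              refine ⟨hp, ?_⟩
              intro hc
              have hr1' := hrot p (hrob ▸ hp)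
              have hz : ddist belt d' p = 0 :=
                (ddist_zero_iff belt d' p hb0 (hrb p (hrob ▸ hp)).1 (hrb p (hrob ▸ hp)).2
                  hd'1 hd'2).mpr hc
              have hdd : ddist belt down p = 1 := by omega
              rcases List.mem_cons.mp hp with h | h
              · exact h0 (h.symm.trans hc)
              · have hh := (List.pairwise_cons.mp (hrob ▸ hpair)).1 p h
                have := (hfacts r0 (by rw [hrob]; simp)).1
                omega
            · exact fun h => h.1
      have hentry1 : ∀ r ∈ (downRobot rs d').1,
          1 ≤ ddist belt d' r ∧ ddist belt d' r ≤ n - 2 := by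
        intro r hr
        have hmem := hsub r hr
        have hne := ((hdmem r).mp hr).2
        have hro := hrot r hmem
        have hf := hfacts r hmem
        have hbr := hrb r hmem
        have hnz : ddist belt d' r ≠ 0 := fun h =>
          hne ((ddist_zero_iff belt d' r hb0 hbr.1 hbr.2 hd'1 hd'2).mp h)
        constructor
        · omega
        · omega
      have hentry2 : List.Pairwise (fun a b => ddist belt d' a < ddist belt d' b)
          (downRobot rs d').1 := by
        have hp1 : List.Pairwise (fun a b => ddist belt down a < ddist belt down b)
            (downRobot rs d').1 := by
          cases rs with
          | nil => simp [downRobot]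
          | cons r0 rest =>
            by_cases h : r0 = d'
            · simp only [downRobot, if_pos h]
              exact (List.pairwise_cons.mp hpair).2
            · simpa [downRobot, h] using hpair
        refine hp1.imp_of_mem ?_
        intro a b ha hb'
        have h1 := hrot a (hsub a ha)
        have h2 := hrot b (hsub b hb')
        omega
      -- B's scan simulates A's queue walk
      have hocc0mem : ∀ p, p ∈ PySem.Set.discard occ d' ↔ p ∈ (downRobot rs d').1 := by
        intro p
        rw [PySem.Set.mem_discard, hocc p, hdmem p]
      have hscan := scan_eq belt d' (n - 2) hb hd'1 hd'2 (by omega) (belt - 1).toNat 1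
        (downRobot rs d').1 [] (PySem.Set.discard occ d') cells zero
        (by rw [Int.toNat_of_nonneg (by omega : (0:Int) ≤ belt - 1)]; ring)
        (le_refl 1)
        (by intro r hr; simp at hr; exact hrb r (hsub r hr))
        (by simp)
        (fun r hr => hentry1 r hr)
        (by simp)
        hentry2
        (PySem.Set.nodup_discard _ _ hnd)
        (by intro p; rw [hocc0mem p]; simp)
      simp only [List.nil_append, List.length_nil] at hscan
      obtain ⟨hseq, hsnd, hsmem, hsinv, hspair⟩ := hscan
      have hc1 : (scanB (belt - 1).toNat 1 (PySem.Set.discard occ d') cells zero d' belt).2.1 =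
          (innerA (downRobot rs d').1 0 cells zero d' belt).2.1 := congrArg Prod.fst hseq
      have hc2 : (scanB (belt - 1).toNat 1 (PySem.Set.discard occ d') cells zero d' belt).2.2 =
          (innerA (downRobot rs d').1 0 cells zero d' belt).2.2 := congrArg Prod.snd hseq
      set t := innerA (downRobot rs d').1 0 cells zero d' belt with htdef
      set tb := scanB (belt - 1).toNat 1 (PySem.Set.discard occ d') cells zero d' belt with htbdef
      have hnext : ∀ (rs3 occ3 : List Int),
          (∀ r ∈ rs3, (0 ≤ r ∧ r < belt) ∧ 1 ≤ ddist belt d' r ∧ ddist belt d' r ≤ n - 1) →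
          List.Pairwise (fun a b => ddist belt d' a < ddist belt d' b) rs3 →
          occ3.Nodup → (∀ p, p ∈ occ3 ↔ p ∈ rs3) →
          ∀ z3 c3, loopA f (step + 1) u' d' z3 rs3 c3 k belt =
            loopB f (step + 1) u' d' z3 occ3 c3 k belt := by
        intro rs3 occ3 hf3 hp3 hnd3 hm3 z3 c3
        exact ih (step + 1) u' d' z3 rs3 occ3 c3 hu'1 hu'2 hd'1 hd'2 hud'
          (fun r hr => (hf3 r hr).1)
          (fun _ => ⟨fun r hr => (hf3 r hr).2, hp3⟩)
          (by omega) hnd3 hm3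
      by_cases hload : 0 < cellGet t.2.1 u'
      · simp only [hc1, hc2, if_pos hload]
        by_cases hk : k ≤ (if cellGet (cellSet t.2.1 u' (cellGet t.2.1 u' - 1)) u' = 0 then t.2.2 + 1 else t.2.2)
        · simp only [if_pos hk]
        · simp only [if_neg hk]
          refine hnext (t.1 ++ [u']) (PySem.Set.add tb.1 u') ?_ ?_
            (PySem.Set.nodup_add _ _ hsnd) ?_ _ _
          · intro r hr
            rcases List.mem_append.mp hr with h | h
            · have := hsinv r h; exact ⟨this.1, this.2.1, by omega⟩
            · simp at h; subst h
              exact ⟨⟨hu'1, hu'2⟩, by omega, by omega⟩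
          · refine List.pairwise_append.mpr ⟨hspair, List.pairwise_singleton _ _, ?_⟩
            intro x hx y hy
            simp at hy; subst hy
            have := hsinv x hx
            omega
          · intro p
            rw [PySem.Set.mem_add, hsmem p]
            simp [List.mem_append]
      · simp only [hc1, hc2, if_neg hload]
        by_cases hk : k ≤ t.2.2
        · simp only [if_pos hk]
        · simp only [if_neg hk]
          refine hnext t.1 tb.1 ?_ hspair hsnd hsmem _ _
          intro r hr
          have := hsinv r hr
          exact ⟨this.1, this.2.1, by omega⟩
    · -- the degenerate case n = 1 (belt of length 2; at most one robot ever)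
      have hb2 : belt = 2 := by omega
      have hupd : u' = d' := by
        have h0 : ddist belt d' u' = 0 := by
          show (d' - u') % belt = 0
          rw [hud', hn1]; simp
        exact (ddist_zero_iff belt d' u' hb0 hu'1 hu'2 hd'1 hd'2).mp h0
      clear_value u' d'
      have hfuel1 : (belt - 1).toNat = 1 := by rw [hb2]; decide
      have hfin : ∀ (z3 : Int) (rs3 occ3 c3 : List Int),
          (∀ r ∈ rs3, 0 ≤ r ∧ r < belt) → rs3.length ≤ 1 →
          occ3.Nodup → (∀ p, p ∈ occ3 ↔ p ∈ rs3) →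
          loopA f (step + 1) u' d' z3 rs3 c3 k belt = loopB f (step + 1) u' d' z3 occ3 c3 k belt := by
        intro z3 rs3 occ3 c3 hbnd3 hlen3 hnd3 hm3
        exact ih (step + 1) u' d' z3 rs3 occ3 c3 hu'1 hu'2 hd'1 hd'2 hud' hbnd3
          (fun h2 => absurd h2 (by omega)) (fun _ => hlen3) hnd3 hm3
      have hnd0 : (PySem.Set.discard occ d').Nodup := PySem.Set.nodup_discard _ _ hnd
      rw [hfuel1]
      -- case analysis on the (≤ 1 element) robot list
      cases hrob : rs with
      | nil =>
        have hoccnil : occ = [] := by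
          apply List.eq_nil_iff_forall_not_mem.mpr
          intro x hx
          have := (hocc x).mp hx
          rw [hrob] at this
          simp at this
        subst hoccnil
        have hdnil : PySem.Set.discard ([] : List Int) d' = [] := by
          apply List.eq_nil_iff_forall_not_mem.mpr
          intro x hx
          rw [PySem.Set.mem_discard] at hx
          simp at hx
        rw [hdnil, scanB_empty]
        rw [show (downRobot [] d').1 = ([] : List Int) from rfl]
        rw [innerA_stop _ _ _ _ _ _ (by simp)]
        dsimp only
        by_cases hload : 0 < cellGet cells u'
        · simp only [if_pos hload]
          by_cases hk : k ≤ (if cellGet (cellSet cells u' (cellGet cells u' - 1)) u' = 0 then zero + 1 else zero)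
          · simp only [if_pos hk]
          · simp only [if_neg hk]
            refine hfin _ _ _ _ (by intro r hr; simp at hr; subst hr; exact ⟨hu'1, hu'2⟩) (by simp)
              (PySem.Set.nodup_add _ _ List.nodup_nil) ?_
            intro p
            rw [PySem.Set.mem_add]
            simp
        · simp only [if_neg hload]
          by_cases hk : k ≤ zero
          · simp only [if_pos hk]
          · simp only [if_neg hk]
            exact hfin _ _ _ _ (by simp) (by simp) (by simp) (by simp)
      | cons r0 rest =>
        have hrest : rest = [] := by
          have h := hr1 hn1
          rw [hrob] at h
          simp only [List.length_cons] at h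
          exact List.length_eq_zero_iff.mp (by omega)
        subst hrest
        have hoccm : ∀ p, p ∈ occ ↔ p = r0 := by
          intro p; rw [hocc p, hrob]; simp
        have hr0b := hrb r0 (by rw [hrob]; simp)
        by_cases h0 : r0 = d'
        · -- the only robot is unloaded immediately
          have hdrq : (downRobot (r0 :: []) d').1 = [] := by simp [downRobot, h0]
          rw [hdrq]
          have hdnil : PySem.Set.discard occ d' = [] := by
            apply List.eq_nil_iff_forall_not_mem.mpr
            intro x hx
            rw [PySem.Set.mem_discard] at hx
            exact hx.2 (((hoccm x).mp hx.1).trans h0)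
          rw [hdnil, scanB_empty]
          rw [innerA_stop _ _ _ _ _ _ (by simp)]
          dsimp only
          by_cases hload : 0 < cellGet cells u'
          · simp only [if_pos hload]
            by_cases hk : k ≤ (if cellGet (cellSet cells u' (cellGet cells u' - 1)) u' = 0 then zero + 1 else zero)
            · simp only [if_pos hk]
            · simp only [if_neg hk]
              refine hfin _ _ _ _ (by intro r hr; simp at hr; subst hr; exact ⟨hu'1, hu'2⟩) (by simp)
                (PySem.Set.nodup_add _ _ List.nodup_nil) ?_
              intro p
              rw [PySem.Set.mem_add]
              simp
          · simp only [if_neg hload]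
            by_cases hk : k ≤ zero
            · simp only [if_pos hk]
            · simp only [if_neg hk]
              exact hfin _ _ _ _ (by simp) (by simp) (by simp) (by simp)
        · -- one robot on the loading half: it faces the unload cell
          have hdrq : (downRobot (r0 :: []) d').1 = [r0] := by simp [downRobot, h0]
          rw [hdrq]
          have hocc0m : ∀ p, p ∈ PySem.Set.discard occ d' ↔ p = r0 := by
            intro p
            rw [PySem.Set.mem_discard, hoccm p]
            constructor
            · exact fun h => h.1
            · intro h; exact ⟨h, fun hc => h0 (h ▸ hc)⟩
          have hm : PySem.Int.mod (d' - 1) belt ∈ PySem.Set.discard occ d' ∧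
              PySem.Int.mod (d' - 1) belt = r0 := by
            have : PySem.Int.mod (d' - 1) belt = r0 := by
              rcases (by omega : d' = 0 ∨ d' = 1) with h | h <;>
                (subst h; rw [hb2]) <;>
                (rcases (by omega : r0 = 0 ∨ r0 = 1) with h2 | h2 <;> first
                  | (subst h2; first | rfl | (exfalso; omega))
                  | (subst h2; first | rfl | (exfalso; omega)))
            exact ⟨(hocc0m _).mpr this, this⟩
          have hfrq : PySem.Int.mod (r0 + 1) belt = d' := by
            rcases (by omega : d' = 0 ∨ d' = 1) with h | h <;>
              rcases (by omega : r0 = 0 ∨ r0 = 1) with h2 | h2 <;>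
              (subst h; subst h2; rw [hb2]) <;> first | rfl | (exfalso; omega)
          have hfrAq : getIdxA (r0 + 1) belt = d' := by
            rw [getIdxA, getIdx_eq _ _ hb0, ← modp _ _ hb0, hfrq]
          have hd'no : d' ∉ PySem.Set.discard occ d' := by
            intro hx
            exact h0 (((hocc0m d').mp hx).symm)
          by_cases hcell : 0 < cellGet cells d'
          · -- the robot steps onto the unload cell and leaves the belt
            have hA : innerA [r0] 0 cells zero d' belt
                = ([], cellSet cells d' (cellGet cells d' - 1),
                   if cellGet (cellSet cells d' (cellGet cells d' - 1)) d' = 0 then zero + 1 else zero) := by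
              rw [innerA_move [r0] 0 cells zero d' belt d' (by simp)
                  (by simpa using hfrAq.symm) ⟨hcell, by simp⟩]
              simp [downRobot, innerA_stop]
            have hB : scanB 1 1 (PySem.Set.discard occ d') cells zero d' belt
                = (PySem.Set.discard (PySem.Set.discard occ d') r0,
                   cellSet cells d' (cellGet cells d' - 1),
                   if cellGet (cellSet cells d' (cellGet cells d' - 1)) d' = 0 then zero + 1 else zero) := by
              rw [scanB_move 0 1 r0 d' (PySem.Set.discard occ d') cells zero d' belt
                  hm.2.symm hfrq.symm (by rw [← hm.2]; exact hm.1) ⟨hcell, hd'no⟩]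
              simp [scanB]
            rw [hA, hB]
            have hX : ∀ p, p ∈ PySem.Set.discard (PySem.Set.discard occ d') r0 ↔ False := by
              intro p
              rw [PySem.Set.mem_discard, hocc0m p]
              simp
            by_cases hload : 0 < cellGet (cellSet cells d' (cellGet cells d' - 1)) u'
            · simp only [if_pos hload]
              simp only [List.nil_append]
              refine if_congr Iff.rfl rfl (hfin _ _ _ _ ?_ ?_ ?_ ?_)
              · intro r hr; simp at hr; subst hr; exact ⟨hu'1, hu'2⟩
              · simp
              · exact PySem.Set.nodup_add _ _ (PySem.Set.nodup_discard _ _ hnd0)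
              · intro p
                rw [PySem.Set.mem_add, hX p]
                simp
            · simp only [if_neg hload]
              refine if_congr Iff.rfl rfl (hfin _ _ _ _ ?_ ?_ ?_ ?_)
              · intro r hr; simp at hr
              · simp
              · exact PySem.Set.nodup_discard _ _ hnd0
              · intro p
                rw [hX p]
                simp
          · -- the cell in front is exhausted: the robot stays, and no new robot is loaded
            have hA : innerA [r0] 0 cells zero d' belt = ([r0], cells, zero) := by
              rw [innerA_blocked [r0] 0 cells zero d' belt d' (by simp)
                  (by simpa using hfrAq.symm) (fun hc => hcell hc.1)]
              exact innerA_stop _ _ _ _ _ _ (by simp)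
            have hB : scanB 1 1 (PySem.Set.discard occ d') cells zero d' belt
                = (PySem.Set.discard occ d', cells, zero) := by
              rw [scanB_blocked 0 1 r0 d' (PySem.Set.discard occ d') cells zero d' belt
                  hm.2.symm hfrq.symm (by rw [← hm.2]; exact hm.1) (fun hc => hcell hc.1)]
              rfl
            rw [hA, hB]
            have hloadno : ¬ 0 < cellGet cells u' := by rw [hupd]; exact hcell
            simp only [if_neg hloadno]
            refine if_congr Iff.rfl rfl (hfin _ _ _ _ ?_ ?_ ?_ ?_)
            · intro r hr; simp at hr; subst hr; exact hr0b
            · simp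
            · exact hnd0
            · intro p
              rw [hocc0m p]
              simp

theorem loopA_quick (k belt up0 down0 : Int) (m : Nat) (zero : Int) (cells : List Int)
    (hk : k ≤ zero) :
    loopA (m + 1) 0 up0 down0 zero [] cells k belt = 1 := by
  rw [loopA_succ]
  dsimp only
  rw [show (downRobot [] (getIdxA (down0 - 1) belt)).1 = [] from rfl]
  rw [innerA_stop [] 0 cells zero _ _ (by simp)]
  dsimp only
  by_cases hload : 0 < cellGet cells (getIdxA (up0 - 1) belt)
  · simp only [if_pos hload]
    rw [if_pos (show k ≤ _ by split_ifs <;> omega)]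
    norm_num
  · simp only [if_neg hload]
    rw [if_pos (show k ≤ zero by omega)]
    norm_num

theorem loopB_quick (k belt up0 down0 : Int) (m : Nat) (zero : Int) (cells : List Int)
    (hk : k ≤ zero) :
    loopB (m + 1) 0 up0 down0 zero [] cells k belt = 1 := by
  rw [loopB_succ]
  dsimp only
  have hdnil : PySem.Set.discard ([] : List Int) (PySem.Int.mod (down0 - 1) belt) = [] := by
    apply List.eq_nil_iff_forall_not_mem.mpr
    intro x hx
    rw [PySem.Set.mem_discard] at hx
    simp at hx
  rw [hdnil, scanB_empty]
  by_cases hload : 0 < cellGet cells (PySem.Int.mod (up0 - 1) belt)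
  · simp only [if_pos hload]
    rw [if_pos (show k ≤ _ by split_ifs <;> omega)]
    norm_num
  · simp only [if_neg hload]
    rw [if_pos (show k ≤ zero by omega)]
    norm_num

-- ===== VERDICT (by name: the statement is the Claim_ definition above) =====
theorem solution_spec : Claim_equal_solution := by
  unfold Claim_equal_solution
  intro n k alist _ hpre
  unfold Spec_solution
  rcases hpre with ⟨hn, -, -⟩ | ⟨hn, hne, hk⟩
  · simp only [solution, solution_alt]
    rw [show (2:Int) * n = n * 2 from mul_comm 2 n]
    exact loop_eq n k (n * 2) hn (by ring) _ 0 0 (n - 1) _ [] [] alist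
      (le_refl 0) (by omega) (by omega) (by omega) (by rw [sub_zero])
      (by simp) (fun _ => ⟨by simp, by simp⟩) (fun _ => by simp) List.nodup_nil (by simp)
  · simp only [solution, solution_alt]
    have hk' : k ≤ ((PySem.List.count alist 0 : Nat) : Int) := by
      rw [PySem.List.count_eq]; exact hk
    rw [loopA_quick k (n * 2) 0 (n - 1) _ _ alist hk',
        loopB_quick k (2 * n) 0 (n - 1) _ _ alist hk']
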